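-- pv_equiv track=rewrite | github.com/matejmojemeno/thesis | src/rotation_prediction/functions/tail.py | find_largest_section
-- ===== SOURCE A (Python) =====
-- def find_largest_section(array):
--     max_section_len = 0
--     section = (None, None)
--
--     for i, index1 in enumerate(array):
--         for j, index2 in enumerate(array[i:], start=i):
--             if index2 - index1 == j - i:
--                 if j - i > max_section_len:
--                     max_section_len = j - i
--                     section = (index1, index2)
--
--     return section
-- ===== SOURCE B (Python) =====
-- def find_largest_section(array):
--     first = {}
--     best = 0
--     section = (None, None)
--     for j, value in enumerate(array):
--         d = value - j
--         if d in first: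
--             start_index, start_value = first[d]
--             gap = j - start_index
--             if gap > best:
--                 best = gap
--                 section = (start_value, value)
--         else:
--             first[d] = (j, value)
--     return section
-- ===== Notes on version B (the rewrite author's own statement) =====
-- stated objective: faster
-- what changed: Replaces the quadratic all-pairs scan with a single pass that hashes each value-minus-index key to its first occurrence, so the best gap for each key is found in O(1) per element.
import Mathlib
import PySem

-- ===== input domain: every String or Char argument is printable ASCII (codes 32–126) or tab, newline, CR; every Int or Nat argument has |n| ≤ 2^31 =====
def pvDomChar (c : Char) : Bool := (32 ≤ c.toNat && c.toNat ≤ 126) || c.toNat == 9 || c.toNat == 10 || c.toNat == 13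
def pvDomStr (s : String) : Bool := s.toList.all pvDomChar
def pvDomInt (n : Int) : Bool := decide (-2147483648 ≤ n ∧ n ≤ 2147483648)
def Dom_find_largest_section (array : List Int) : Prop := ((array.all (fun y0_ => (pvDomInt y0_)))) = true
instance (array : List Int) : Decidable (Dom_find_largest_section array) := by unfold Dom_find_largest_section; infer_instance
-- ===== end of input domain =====

-- B replaces A's quadratic all-pairs scan by one pass keyed on value-minus-index (faster: asymptotic, O(n^2) → O(n)).

-- ===== PORT A =====
-- literal port of A: nested loops over enumerate(array) and enumerate(array[i:], start=i),
-- tracking (max_section_len, section); the Python tuple (index1, index2) / (None, None)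
-- is rendered as the two-element list [some index1, some index2] / [none, none].
def find_largest_section (array : List Int) : List (Option Int) :=
  let st := (PySem.List.enumerate array).foldl
    (fun st p =>
      (PySem.List.enumerate (PySem.List.slice array (some p.1) none) p.1).foldl
        (fun st q =>
          if q.2 - p.2 = q.1 - p.1 then
            if q.1 - p.1 > st.1 then (q.1 - p.1, [some p.2, some q.2]) else st
          else st) st)
    ((0 : Int), ([none, none] : List (Option Int)))
  st.2

-- ===== PORT B =====
-- literal port of B (Source B): single pass, dict 'first' maps d = value - index to the
-- first (index, value) with that d; state is (first, best, section).
def find_largest_section_alt (array : List Int) : List (Option Int) :=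
  let st := (PySem.List.enumerate array).foldl
    (fun st p =>
      let d := p.2 - p.1
      match PySem.Dict.get? st.1 d with
      | some fv =>
        let gap := p.1 - fv.1
        if gap > st.2.1 then (st.1, gap, [some fv.2, some p.2]) else st
      | none => (PySem.Dict.insert st.1 d (p.1, p.2), st.2.1, st.2.2))
    ((PySem.Dict.empty : PySem.Dict Int (Int × Int)), (0 : Int), ([none, none] : List (Option Int)))
  st.2.2

-- ===== PRECONDITION & SPEC =====
def Spec_find_largest_section (array : List Int) (out : List (Option Int)) : Prop := out = find_largest_section_alt array
instance (array : List Int) (out : List (Option Int)) : Decidable (Spec_find_largest_section array out) := by unfold Spec_find_largest_section; infer_instance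

-- ===== CLAIM (what is proved, stated in full; the proofs are below) =====
def Claim_equal_find_largest_section : Prop := ∀ (array : List Int), Dom_find_largest_section array → Spec_find_largest_section array (find_largest_section array)

-- ===== LEMMAS AND PROOFS =====

-- array element / difference value at a natural index (all uses are in range)
def pvA (array : List Int) (k : Nat) : Int := array.getD k 0
def pvD (array : List Int) (k : Nat) : Int := pvA array k - (k : Int)

-- the strict-improvement selection step shared by both loops
def pvSel (st c : Int × List (Option Int)) : Int × List (Option Int) :=
  if c.1 > st.1 then c else st

def pvFsm (st : Int × List (Option Int)) (l : List (Int × List (Option Int))) :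
    Int × List (Option Int) := l.foldl pvSel st

def pvInit : Int × List (Option Int) := (0, [none, none])

def pvCand (array : List Int) (i j : Nat) : Int × List (Option Int) :=
  ((j : Int) - (i : Int), [some (pvA array i), some (pvA array j)])

abbrev pvValid (array : List Int) (i j : Nat) : Prop :=
  j < array.length ∧ i ≤ j ∧ pvD array i = pvD array j

-- candidates in A's (lexicographic) order
def pvToCand (array : List Int) (i t : Nat) : Option (Int × List (Option Int)) :=
  if pvA array (i + t) - pvA array i = (t : Int) then some (pvCand array i (i + t)) else none

def pvCandsA (array : List Int) : List (Int × List (Option Int)) :=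
  (List.range array.length).flatMap (fun i =>
    (List.range (array.length - i)).filterMap (pvToCand array i))

-- first index with the same d-value
theorem pvF_ex (array : List Int) (j : Nat) : ∃ i, i ≤ j ∧ pvD array i = pvD array j :=
  ⟨j, le_refl j, rfl⟩

def pvF (array : List Int) (j : Nat) : Nat := Nat.find (pvF_ex array j)

-- candidates in B's (per-endpoint) order, from position k on
def pvCandsC (array : List Int) (k : Nat) : List (Int × List (Option Int)) :=
  (List.range' k (array.length - k)).map (fun j => pvCand array (pvF array j) j)

-- basic facts about pvF
theorem pvF_le (array : List Int) (j : Nat) : pvF array j ≤ j := (Nat.find_spec (pvF_ex array j)).1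
theorem pvF_d (array : List Int) (j : Nat) : pvD array (pvF array j) = pvD array j := (Nat.find_spec (pvF_ex array j)).2
theorem pvF_min (array : List Int) {i j : Nat} (hij : i ≤ j) (hd : pvD array i = pvD array j) :
    pvF array j ≤ i := Nat.find_min' (pvF_ex array j) ⟨hij, hd⟩
theorem pvF_valid (array : List Int) {j : Nat} (hj : j < array.length) :
    pvValid array (pvF array j) j := ⟨hj, pvF_le array j, pvF_d array j⟩

-- fsm basics
theorem pvFsm_nil (st : Int × List (Option Int)) : pvFsm st [] = st := rfl
theorem pvFsm_cons (st c l) : pvFsm st (c :: l) = pvFsm (pvSel st c) l := rfl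
theorem pvFsm_append (st l1 l2) : pvFsm st (l1 ++ l2) = pvFsm (pvFsm st l1) l2 :=
  List.foldl_append

theorem pvFsm_no_update (st : Int × List (Option Int)) (l : List (Int × List (Option Int)))
    (h : ∀ c ∈ l, c.1 ≤ st.1) : pvFsm st l = st := by
  induction l with
  | nil => rfl
  | cons c t ih =>
    have hc : pvSel st c = st := by
      simp [pvSel, not_lt.mpr (h c (by simp))]
    rw [pvFsm_cons, hc]
    exact ih (fun x hx => h x (by simp [hx]))

theorem pvFsm_fst_lt (st : Int × List (Option Int)) (l : List (Int × List (Option Int))) (b : Int)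
    (hst : st.1 < b) (h : ∀ c ∈ l, c.1 < b) : (pvFsm st l).1 < b := by
  induction l generalizing st with
  | nil => exact hst
  | cons c t ih =>
    rw [pvFsm_cons]
    refine ih (pvSel st c) ?_ (fun x hx => h x (by simp [hx]))
    by_cases hcc : c.1 > st.1 <;> simp [pvSel, hcc]
    · exact h c (by simp)
    · exact hst

theorem pvFsm_first_max (st : Int × List (Option Int)) (c : Int × List (Option Int))
    (l1 l2 : List (Int × List (Option Int)))
    (h1 : ∀ x ∈ l1, x.1 < c.1) (h2 : ∀ x ∈ l2, x.1 ≤ c.1) (h3 : st.1 < c.1) :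
    pvFsm st (l1 ++ c :: l2) = c := by
  rw [pvFsm_append, pvFsm_cons]
  have hlt : (pvFsm st l1).1 < c.1 := pvFsm_fst_lt st l1 c.1 h3 h1
  have : pvSel (pvFsm st l1) c = c := by simp [pvSel, hlt]
  rw [this]
  exact pvFsm_no_update c l2 h2

-- a guarded fold is the fsm of the filterMapped candidates
theorem pvFoldl_guard {β : Type} (l : List β) (toc : β → Option (Int × List (Option Int)))
    (st : Int × List (Option Int)) :
    l.foldl (fun st x => match toc x with | some c => pvSel st c | none => st) st
      = pvFsm st (l.filterMap toc) := by
  induction l generalizing st with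
  | nil => rfl
  | cons x t ih =>
    cases hx : toc x <;> simp [List.foldl_cons, hx, ih, pvFsm_cons]

-- enumerate over range
theorem pvEnum (xs : List Int) (s : Int) :
    PySem.List.enumerate xs s
      = (List.range xs.length).map (fun (k : Nat) => (s + (k : Int), xs.getD k 0)) := by
  induction xs generalizing s with
  | nil => simp [PySem.List.enumerate_nil]
  | cons x t ih =>
    rw [PySem.List.enumerate_cons, ih]
    simp only [List.length_cons, List.range_succ_eq_map, List.map_cons, List.map_map]
    refine congrArg₂ _ (by simp) ?_
    apply List.map_congr_left
    intro k _
    show (s + 1 + (k : Int), _) = (s + ((k.succ : Nat) : Int), _)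
    refine congrArg₂ _ (by push_cast; ring) rfl

theorem pvA_drop (array : List Int) (i t : Nat) :
    (array.drop i).getD t 0 = pvA array (i + t) := by
  simp [pvA, List.getD_eq_getElem?_getD, List.getElem?_drop]

-- membership characterizations
theorem pvMem_candsA (array : List Int) (x : Int × List (Option Int)) :
    x ∈ pvCandsA array ↔ ∃ i j, pvValid array i j ∧ x = pvCand array i j := by
  simp only [pvCandsA, List.mem_flatMap, List.mem_filterMap, List.mem_range]
  constructor
  · rintro ⟨i, hi, t, ht, hx⟩
    unfold pvToCand at hx
    split_ifs at hx with hc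
    · refine ⟨i, i + t, ⟨by omega, by omega, ?_⟩, (Option.some_inj.mp hx).symm⟩
      unfold pvD pvA at *
      push_cast at hc ⊢
      omega
  · rintro ⟨i, j, ⟨hj, hij, hd⟩, hx⟩
    refine ⟨i, by omega, j - i, by omega, ?_⟩
    unfold pvToCand
    have hij' : i + (j - i) = j := by omega
    rw [hij']
    have hc : pvA array j - pvA array i = ((j - i : Nat) : Int) := by
      unfold pvD at hd
      omega
    rw [if_pos hc, hx]

-- the maximal gap
def pvM (array : List Int) : Nat :=
  Nat.findGreatest (fun g => ∃ j, j < array.length ∧ g ≤ j ∧ pvValid array (j - g) j)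
    array.length

theorem pvGap_le_M (array : List Int) {i j : Nat} (h : pvValid array i j) :
    j - i ≤ pvM array := by
  obtain ⟨hj, hij, hd⟩ := h
  apply Nat.le_findGreatest (by omega)
  refine ⟨j, hj, by omega, ?_⟩
  have h2 : j - (j - i) = i := by omega
  rw [h2]
  exact ⟨hj, hij, hd⟩

theorem pvM_spec (array : List Int) (h : 0 < pvM array) :
    ∃ j, j < array.length ∧ pvM array ≤ j ∧ pvValid array (j - pvM array) j := by
  unfold pvM at h ⊢
  exact (Nat.findGreatest_eq_iff.mp rfl).2.1 (Nat.pos_iff_ne_zero.mp h)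

-- key of a candidate, rewritten to the inner-loop's form
theorem pvToCand_eq (array : List Int) (i t : Nat) :
    pvToCand array i t
      = if pvA array (i + t) - pvA array i = (t : Int) then
          some ((t : Int), [some (pvA array i), some (pvA array (i + t))])
        else none := by
  unfold pvToCand pvCand
  split_ifs with hc
  · have : ((i + t : Nat) : Int) - (i : Int) = (t : Int) := by push_cast; ring
    rw [this]
  · rfl

-- A's port is the fsm of candsA
theorem pvA_eq (array : List Int) :
    find_largest_section array = (pvFsm pvInit (pvCandsA array)).2 := by
  unfold find_largest_section
  simp only [pvEnum, List.foldl_map, PySem.List.slice_from_natCast, zero_add,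
    List.length_drop, pvA_drop, add_sub_cancel_left]
  congr 1
  unfold pvCandsA pvFsm pvInit
  rw [List.foldl_flatMap]
  congr 1
  funext st i
  have hg := pvFoldl_guard (List.range (array.length - i)) (pvToCand array i) st
  unfold pvFsm at hg
  rw [← hg]
  congr 1
  funext st t
  rw [pvToCand_eq]
  unfold pvA
  split_ifs with hc h2 <;> simp [pvSel, *]

-- the dict of B's loop after processing the first k elements
def pvInv (array : List Int) (k : Nat) (dct : PySem.Dict Int (Int × Int)) : Prop :=
  ∀ dv : Int, dct.get? dv
    = if h : ∃ i, i < k ∧ pvD array i = dv then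
        some (((Nat.find h : Nat) : Int), pvA array (Nat.find h))
      else none

-- the first witness below k is also the first witness below k+1 (and any larger bound)
theorem pvFind_bound (array : List Int) {k k' : Nat} (dv : Int) (hkk : k ≤ k')
    (h : ∃ i, i < k ∧ pvD array i = dv) (h' : ∃ i, i < k' ∧ pvD array i = dv) :
    Nat.find h' = Nat.find h := by
  have hs := Nat.find_spec h
  have hs' := Nat.find_spec h'
  have h1 : Nat.find h' ≤ Nat.find h := Nat.find_min' h' ⟨by omega, hs.2⟩
  exact le_antisymm h1 (Nat.find_min' h ⟨by omega, hs'.2⟩)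

theorem pvFind_eq_pvF (array : List Int) {k : Nat}
    (h : ∃ i, i < k ∧ pvD array i = pvD array k) : Nat.find h = pvF array k := by
  have hcopy := h
  obtain ⟨i0, hi0, hd0⟩ := hcopy
  have h1 : pvF array k ≤ Nat.find h :=
    pvF_min array (le_of_lt (Nat.find_spec h).1) (Nat.find_spec h).2
  have h2 : pvF array k ≤ i0 := pvF_min array (by omega) hd0
  exact le_antisymm (Nat.find_min' h ⟨by omega, pvF_d array k⟩) h1

theorem pvF_eq_self (array : List Int) {k : Nat}
    (h : ¬ ∃ i, i < k ∧ pvD array i = pvD array k) : pvF array k = k := by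
  have h1 := pvF_le array k
  rcases Nat.lt_or_ge (pvF array k) k with h2 | h2
  · exact absurd ⟨pvF array k, h2, pvF_d array k⟩ h
  · omega

theorem pvInv_succ_mem (array : List Int) {k : Nat} {dct : PySem.Dict Int (Int × Int)}
    (hex : ∃ i, i < k ∧ pvD array i = pvD array k) (hinv : pvInv array k dct) :
    pvInv array (k + 1) dct := by
  intro dv
  rw [hinv dv]
  by_cases hdv : ∃ i, i < k ∧ pvD array i = dv
  · have hdv' : ∃ i, i < k + 1 ∧ pvD array i = dv := by
      obtain ⟨i, hi, hd⟩ := hdv; exact ⟨i, by omega, hd⟩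
    rw [dif_pos hdv, dif_pos hdv', pvFind_bound array dv (by omega) hdv hdv']
  · have hdv' : ¬ ∃ i, i < k + 1 ∧ pvD array i = dv := by
      rintro ⟨i, hi, hd⟩
      rcases Nat.lt_or_ge i k with h2 | h2
      · exact hdv ⟨i, h2, hd⟩
      · have : i = k := by omega
        subst this
        obtain ⟨i', hi', hd'⟩ := hex
        exact hdv ⟨i', hi', by rw [hd', hd]⟩
    rw [dif_neg hdv, dif_neg hdv']

theorem pvInv_succ_insert (array : List Int) {k : Nat} {dct : PySem.Dict Int (Int × Int)}
    (hex : ¬ ∃ i, i < k ∧ pvD array i = pvD array k) (hinv : pvInv array k dct) :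
    pvInv array (k + 1) (dct.insert (pvD array k) ((k : Int), pvA array k)) := by
  intro dv
  by_cases hdv : dv = pvD array k
  · subst hdv
    rw [PySem.Dict.get?_insert_self]
    have hdv' : ∃ i, i < k + 1 ∧ pvD array i = pvD array k := ⟨k, by omega, rfl⟩
    rw [dif_pos hdv']
    have hk : Nat.find hdv' = k := by
      have h1 : Nat.find hdv' ≤ k := Nat.find_min' hdv' ⟨by omega, rfl⟩
      have h2 := Nat.find_spec hdv'
      rcases Nat.lt_or_ge (Nat.find hdv') k with h3 | h3
      · exact absurd ⟨Nat.find hdv', h3, h2.2⟩ hex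
      · omega
    rw [hk]
  · rw [PySem.Dict.get?_insert_of_ne _ _ hdv, hinv dv]
    by_cases h2 : ∃ i, i < k ∧ pvD array i = dv
    · have h2' : ∃ i, i < k + 1 ∧ pvD array i = dv := by
        obtain ⟨i, hi, hd⟩ := h2; exact ⟨i, by omega, hd⟩
      rw [dif_pos h2, dif_pos h2', pvFind_bound array dv (by omega) h2 h2']
    · have h2' : ¬ ∃ i, i < k + 1 ∧ pvD array i = dv := by
        rintro ⟨i, hi, hd⟩
        rcases Nat.lt_or_ge i k with h3 | h3
        · exact h2 ⟨i, h3, hd⟩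
        · have : i = k := by omega
          subst this
          exact hdv hd.symm
      rw [dif_neg h2, dif_neg h2']

theorem pvB_loop (array : List Int) (l : List Int) (k : Nat)
    (hl : array.drop k = l)
    (dct : PySem.Dict Int (Int × Int)) (st : Int × List (Option Int))
    (hst : 0 ≤ st.1) (hinv : pvInv array k dct) :
    ((PySem.List.enumerate l (k : Int)).foldl
      (fun st p =>
        let d := p.2 - p.1
        match PySem.Dict.get? st.1 d with
        | some fv =>
          let gap := p.1 - fv.1
          if gap > st.2.1 then (st.1, gap, [some fv.2, some p.2]) else st
        | none => (PySem.Dict.insert st.1 d (p.1, p.2), st.2.1, st.2.2))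
      (dct, st)).2
    = pvFsm st (pvCandsC array k) := by
  induction l generalizing k dct st with
  | nil =>
    have hk : array.length ≤ k := List.drop_eq_nil_iff.mp hl
    have : array.length - k = 0 := by omega
    simp [PySem.List.enumerate_nil, pvCandsC, this, pvFsm_nil]
  | cons v t ih =>
    have hk : k < array.length := by
      by_contra hk
      rw [List.drop_eq_nil_iff.mpr (by omega)] at hl
      exact absurd hl (by simp)
    have h0 : array[k]? = some v := by
      have h0 : (array.drop k)[0]? = some v := by rw [hl]; rfl
      rwa [List.getElem?_drop, Nat.add_zero] at h0
    have hv : v = pvA array k := by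
      unfold pvA
      rw [List.getD_eq_getElem?_getD, h0]
      rfl
    have ht : array.drop (k + 1) = t := by
      have h1 := congrArg (List.drop 1) hl
      rw [List.drop_drop] at h1
      simpa using h1
    have hcc : pvCandsC array k = pvCand array (pvF array k) k :: pvCandsC array (k + 1) := by
      unfold pvCandsC
      have h1 : array.length - k = (array.length - (k + 1)) + 1 := by omega
      rw [h1, List.range'_succ, List.map_cons]
    rw [PySem.List.enumerate_cons, List.foldl_cons]
    have hd : v - (k : Int) = pvD array k := by rw [hv]; rfl
    have hcast : ((k : Int) + 1) = (((k + 1 : Nat)) : Int) := by push_cast; ring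
    by_cases hex : ∃ i, i < k ∧ pvD array i = pvD array k
    · have hget : dct.get? (v - (k : Int))
          = some (((pvF array k : Int)), pvA array (pvF array k)) := by
        rw [hd, hinv (pvD array k), dif_pos hex, pvFind_eq_pvF array hex]
      simp only [hget]
      rw [hcast, hcc, pvFsm_cons]
      have hinv' := pvInv_succ_mem array hex hinv
      by_cases h2 : (k : Int) - ((pvF array k : Int)) > st.1
      · rw [if_pos h2]
        have hsel : pvSel st (pvCand array (pvF array k) k) = pvCand array (pvF array k) k := by
          unfold pvSel pvCand
          rw [if_pos h2]
        rw [hsel, hv]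
        have hkey : (0 : Int) ≤ (pvCand array (pvF array k) k).1 := by
          unfold pvCand
          simp only
          have := pvF_le array k
          omega
        exact ih (k + 1) ht dct (pvCand array (pvF array k) k) hkey hinv'
      · rw [if_neg h2]
        have hsel : pvSel st (pvCand array (pvF array k) k) = st := by
          unfold pvSel pvCand
          rw [if_neg h2]
        rw [hsel]
        exact ih (k + 1) ht dct st hst hinv'
    · have hget : dct.get? (v - (k : Int)) = none := by
        rw [hd, hinv (pvD array k), dif_neg hex]
      simp only [hget]
      rw [hcast, hcc]
      have hskip : pvSel st (pvCand array (pvF array k) k) = st := by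
        unfold pvSel pvCand
        rw [pvF_eq_self array hex]
        simp only [sub_self]
        rw [if_neg (by omega)]
      rw [pvFsm_cons, hskip]
      have hinv' : pvInv array (k + 1) (dct.insert (v - (k : Int)) ((k : Int), v)) := by
        rw [hv]
        exact pvInv_succ_insert array hex hinv
      exact ih (k + 1) ht (dct.insert (v - (k : Int)) ((k : Int), v)) st hst hinv'

-- B's port is the fsm of candsC
theorem pvB_eq (array : List Int) :
    find_largest_section_alt array = (pvFsm pvInit (pvCandsC array 0)).2 := by
  have hinv : pvInv array 0 PySem.Dict.empty := by
    intro dv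
    rw [dif_neg (by rintro ⟨i, hi, _⟩; omega)]
    exact PySem.Dict.get?_empty dv
  have h := pvB_loop array array 0 (by simp) PySem.Dict.empty pvInit (by norm_num [pvInit]) hinv
  unfold find_largest_section_alt
  exact congrArg Prod.snd h

theorem pvToCand_some (array : List Int) {i t : Nat} {x : Int × List (Option Int)}
    (h : pvToCand array i t = some x) (hn : i + t < array.length) :
    pvValid array i (i + t) ∧ x = pvCand array i (i + t) := by
  unfold pvToCand at h
  split_ifs at h with hc
  refine ⟨⟨hn, by omega, ?_⟩, (Option.some_inj.mp h).symm⟩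
  unfold pvD
  omega

theorem pvKeyA_le (array : List Int) : ∀ x ∈ pvCandsA array, x.1 ≤ ((pvM array : Nat) : Int) := by
  intro x hx
  obtain ⟨i, j, hval, rfl⟩ := (pvMem_candsA array x).mp hx
  have h1 := pvGap_le_M array hval
  have h2 := hval.2.1
  unfold pvCand
  simp only
  omega

theorem pvCandsC_zero (array : List Int) :
    pvCandsC array 0 = (List.range array.length).map (fun j => pvCand array (pvF array j) j) := by
  unfold pvCandsC
  rw [Nat.sub_zero, ← List.range_eq_range']

theorem pvKeyC_le (array : List Int) : ∀ x ∈ pvCandsC array 0, x.1 ≤ ((pvM array : Nat) : Int) := by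
  intro x hx
  rw [pvCandsC_zero] at hx
  obtain ⟨j, hj, rfl⟩ := List.mem_map.mp hx
  rw [List.mem_range] at hj
  have h1 := pvGap_le_M array (pvF_valid array hj)
  have h2 := pvF_le array j
  unfold pvCand
  simp only
  omega

-- the combinatorial core: both candidate orders select the same element
theorem pvMain (array : List Int) :
    pvFsm pvInit (pvCandsA array) = pvFsm pvInit (pvCandsC array 0) := by
  rcases Nat.eq_zero_or_pos (pvM array) with hM | hM
  · rw [pvFsm_no_update _ _ (fun x hx => by
        have h1 := pvKeyA_le array x hx; rw [hM] at h1; simpa [pvInit] using h1),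
      pvFsm_no_update _ _ (fun x hx => by
        have h1 := pvKeyC_le array x hx; rw [hM] at h1; simpa [pvInit] using h1)]
  · -- 0 < M : both sides pick the first maximal-gap candidate
    obtain ⟨j0, hj0, hMj0, hval0⟩ := pvM_spec array hM
    have hEx : ∃ i, pvValid array i (i + pvM array) := by
      refine ⟨j0 - pvM array, ?_⟩
      have h2 : j0 - pvM array + pvM array = j0 := by omega
      rw [h2]
      exact hval0
    have hv0 : pvValid array (Nat.find hEx) (Nat.find hEx + pvM array) := Nat.find_spec hEx
    have hmin : ∀ i, pvValid array i (i + pvM array) → Nat.find hEx ≤ i :=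
      fun i h => Nat.find_min' hEx h
    generalize hi0 : Nat.find hEx = i0 at hv0 hmin
    have hjn : i0 + pvM array < array.length := hv0.1
    have hF : pvF array (i0 + pvM array) = i0 := by
      have h1 : pvF array (i0 + pvM array) ≤ i0 := pvF_min array hv0.2.1 hv0.2.2
      have h2 := pvGap_le_M array (pvF_valid array hjn)
      have h3 := pvF_le array (i0 + pvM array)
      omega
    have hc1 : (pvCand array i0 (i0 + pvM array)).1 = ((pvM array : Nat) : Int) := by
      unfold pvCand
      simp only
      push_cast
      ring
    -- C side
    have hCsplit : List.range array.length = List.range (i0 + pvM array)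
        ++ [i0 + pvM array]
        ++ List.map (fun x => (i0 + pvM array + 1) + x)
            (List.range (array.length - (i0 + pvM array + 1))) := by
      rw [← List.range_succ, ← List.range_add]
      congr 1
      omega
    have hCdecomp : pvCandsC array 0
        = (List.range (i0 + pvM array)).map (fun j => pvCand array (pvF array j) j)
          ++ pvCand array i0 (i0 + pvM array)
            :: (List.map (fun x => (i0 + pvM array + 1) + x)
                (List.range (array.length - (i0 + pvM array + 1)))).map
                  (fun j => pvCand array (pvF array j) j) := by
      rw [pvCandsC_zero, hCsplit]
      simp only [List.map_append, List.map_cons, List.append_assoc, List.singleton_append]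
      rw [hF]
    have hCres : pvFsm pvInit (pvCandsC array 0) = pvCand array i0 (i0 + pvM array) := by
      rw [hCdecomp]
      apply pvFsm_first_max
      · intro x hx
        obtain ⟨j, hj, rfl⟩ := List.mem_map.mp hx
        rw [List.mem_range] at hj
        have hjn2 : j < array.length := by omega
        have hg := pvGap_le_M array (pvF_valid array hjn2)
        have hfle := pvF_le array j
        have hne : j - pvF array j ≠ pvM array := by
          intro he
          have h5 : pvF array j + pvM array = j := by omega
          have h6 : pvValid array (pvF array j) (pvF array j + pvM array) := by
            rw [h5]
            exact pvF_valid array hjn2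
          have := hmin _ h6
          omega
        rw [hc1]
        unfold pvCand
        simp only
        omega
      · intro x hx
        have hxC : x ∈ pvCandsC array 0 := by
          rw [hCdecomp]
          exact List.mem_append.mpr (Or.inr (List.mem_cons.mpr (Or.inr hx)))
        rw [hc1]
        exact pvKeyC_le array x hxC
      · rw [hc1]
        show (0 : Int) < _
        omega
    -- A side
    have hcond : pvA array (i0 + pvM array) - pvA array i0 = ((pvM array : Nat) : Int) := by
      have h5 := hv0.2.2
      unfold pvD at h5
      push_cast at h5 ⊢
      omega
    have htoc : pvToCand array i0 (pvM array) = some (pvCand array i0 (i0 + pvM array)) := by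
      unfold pvToCand
      rw [if_pos hcond]
    have hAsplit1 : List.range array.length = List.range i0 ++ [i0]
        ++ List.map (fun x => (i0 + 1) + x) (List.range (array.length - (i0 + 1))) := by
      rw [← List.range_succ, ← List.range_add]
      congr 1
      omega
    have hAsplit2 : List.range (array.length - i0)
        = List.range (pvM array) ++ [pvM array]
        ++ List.map (fun x => (pvM array + 1) + x)
            (List.range (array.length - i0 - (pvM array + 1))) := by
      rw [← List.range_succ, ← List.range_add]
      congr 1
      omega
    have hAdecomp : pvCandsA array
        = ((List.range i0).flatMap (fun i =>
              (List.range (array.length - i)).filterMap (pvToCand array i))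
            ++ (List.range (pvM array)).filterMap (pvToCand array i0))
          ++ pvCand array i0 (i0 + pvM array)
            :: ((List.map (fun x => (pvM array + 1) + x)
                  (List.range (array.length - i0 - (pvM array + 1)))).filterMap (pvToCand array i0)
              ++ (List.map (fun x => (i0 + 1) + x)
                  (List.range (array.length - (i0 + 1)))).flatMap (fun i =>
                    (List.range (array.length - i)).filterMap (pvToCand array i))) := by
      unfold pvCandsA
      rw [hAsplit1]
      simp only [List.flatMap_append, List.flatMap_cons, List.flatMap_nil, List.append_nil]
      rw [hAsplit2]
      simp only [List.filterMap_append, List.filterMap_cons, htoc,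
        List.append_assoc, List.nil_append, List.cons_append]
    have hAres : pvFsm pvInit (pvCandsA array) = pvCand array i0 (i0 + pvM array) := by
      rw [hAdecomp]
      apply pvFsm_first_max
      · intro x hx
        rw [hc1]
        rcases List.mem_append.mp hx with hx1 | hx2
        · obtain ⟨i, hi, hfm⟩ := List.mem_flatMap.mp hx1
          rw [List.mem_range] at hi
          obtain ⟨t, ht, hsome⟩ := List.mem_filterMap.mp hfm
          rw [List.mem_range] at ht
          obtain ⟨hval, rfl⟩ := pvToCand_some array hsome (by omega)
          have hg := pvGap_le_M array hval
          have hne : t ≠ pvM array := by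
            intro he
            subst he
            have := hmin i hval
            omega
          unfold pvCand
          simp only
          omega
        · obtain ⟨t, ht, hsome⟩ := List.mem_filterMap.mp hx2
          rw [List.mem_range] at ht
          obtain ⟨hval, rfl⟩ := pvToCand_some array hsome (by omega)
          unfold pvCand
          simp only
          omega
      · intro x hx
        have hxA : x ∈ pvCandsA array := by
          rw [hAdecomp]
          exact List.mem_append.mpr (Or.inr (List.mem_cons.mpr (Or.inr hx)))
        rw [hc1]
        exact pvKeyA_le array x hxA
      · rw [hc1]
        show (0 : Int) < _
        omega
    rw [hAres, hCres]

-- ===== VERDICT (by name: the statement is the Claim_ definition above) =====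
theorem find_largest_section_spec : Claim_equal_find_largest_section := by
  intro array _
  unfold Spec_find_largest_section
  rw [pvA_eq, pvB_eq, pvMain]
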